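-- pv_equiv track=rewrite | github.com/Golan1/PicAPix | ConvertColormapToRules.py | getRowRules
-- ===== SOURCE A (Python) =====
-- def getRowRules(row):
--     sum = 0
--     res = []
--     previousColor = 0
--     for currentColor in row:
--         if currentColor == 0:
--             if previousColor != 0:
--                 res.append((str(sum), str(previousColor)))
--                 sum = 0
--         elif currentColor == previousColor:
--             sum += 1
--         elif previousColor == 0:
--             sum = 1
--         else:
--             res.append((str(sum), str(previousColor)))
--             sum = 1
--         previousColor = currentColor
--
--     if sum != 0:
--         res.append((str(sum), str(previousColor)))
--
--     return " ".join([",".join(component) for component in res])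
-- ===== SOURCE B (Python) =====
-- from itertools import groupby
--
-- def getRowRules(row):
--     parts = []
--     for color, grp in groupby(row):
--         if color != 0:
--             parts.append(str(sum(1 for _ in grp)) + "," + str(color))
--     return " ".join(parts)
-- ===== Notes on version B (the rewrite author's own statement) =====
-- stated objective: idiomatic
-- what changed: Replaces A's previousColor/sum state machine (with four-way branching and a trailing flush) by itertools.groupby: the row is split into maximal runs of equal values, zero-keyed runs are filtered out, and each remaining run is rendered as 'length,color'.
import Mathlib
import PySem

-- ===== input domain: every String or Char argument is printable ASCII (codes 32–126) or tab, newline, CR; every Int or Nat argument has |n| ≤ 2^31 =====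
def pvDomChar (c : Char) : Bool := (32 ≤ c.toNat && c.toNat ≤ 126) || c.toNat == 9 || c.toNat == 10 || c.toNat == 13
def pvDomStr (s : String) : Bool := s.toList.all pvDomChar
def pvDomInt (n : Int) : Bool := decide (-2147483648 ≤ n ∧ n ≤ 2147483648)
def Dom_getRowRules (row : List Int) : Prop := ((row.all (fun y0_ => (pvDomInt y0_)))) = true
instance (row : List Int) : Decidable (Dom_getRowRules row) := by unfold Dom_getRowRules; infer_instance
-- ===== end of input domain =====

-- B replaces A's previousColor/sum state machine by grouping the row into maximal runs
-- (itertools.groupby) and filtering out the zero runs (objective: more idiomatic).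

-- ===== PORT A =====
-- state = (sum, res, previousColor); one loop step of A
def pvAStep (st : Int × List (String × String) × Int) (currentColor : Int) :
    Int × List (String × String) × Int :=
  let sum := st.1
  let res := st.2.1
  let previousColor := st.2.2
  if currentColor = 0 then
    if previousColor ≠ 0 then
      (0, res ++ [(PySem.Int.toStr sum, PySem.Int.toStr previousColor)], currentColor)
    else (sum, res, currentColor)
  else if currentColor = previousColor then (sum + 1, res, currentColor)
  else if previousColor = 0 then (1, res, currentColor)
  else (1, res ++ [(PySem.Int.toStr sum, PySem.Int.toStr previousColor)], currentColor)

def getRowRules (row : List Int) : String :=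
  let st := row.foldl pvAStep (0, [], 0)
  let res :=
    if st.1 ≠ 0 then st.2.1 ++ [(PySem.Int.toStr st.1, PySem.Int.toStr st.2.2)] else st.2.1
  PySem.Str.join " " (res.map (fun component => PySem.Str.join "," [component.1, component.2]))

-- ===== PORT B =====
-- itertools.groupby(row): the list of (key, run length) for the maximal runs of equal values
def pvGroups : List Int → List (Int × Int)
  | [] => []
  | c :: cs =>
      (c, 1 + ((cs.takeWhile (· == c)).length : Int)) :: pvGroups (cs.dropWhile (· == c))
termination_by l => l.length
decreasing_by simpa using Nat.lt_succ_of_le (List.length_dropWhile_le _ cs)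

def getRowRules_alt (row : List Int) : String :=
  PySem.Str.join " "
    ((pvGroups row).foldl
      (fun parts g =>
        if g.1 ≠ 0 then parts ++ [PySem.Int.toStr g.2 ++ "," ++ PySem.Int.toStr g.1] else parts)
      [])

-- ===== PRECONDITION & SPEC =====
def Spec_getRowRules (row : List Int) (out : String) : Prop := out = getRowRules_alt row
instance (row : List Int) (out : String) : Decidable (Spec_getRowRules row out) := by
  unfold Spec_getRowRules; infer_instance

-- ===== CLAIM (what is proved, stated in full; the proofs are below) =====
def Claim_equal_getRowRules : Prop := ∀ (row : List Int), Dom_getRowRules row → Spec_getRowRules row (getRowRules row)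

-- ===== LEMMAS AND PROOFS =====

-- A's loop, abstracted from the tuple plumbing: the strings A will still emit from state (sum, prev)
def pvE : Int → Int → List Int → List String
  | sum, prev, [] =>
      if sum ≠ 0 then [PySem.Int.toStr sum ++ "," ++ PySem.Int.toStr prev] else []
  | sum, prev, c :: cs =>
      if c = 0 then
        if prev ≠ 0 then (PySem.Int.toStr sum ++ "," ++ PySem.Int.toStr prev) :: pvE 0 0 cs
        else pvE sum 0 cs
      else if c = prev then pvE (sum + 1) prev cs
      else if prev = 0 then pvE 1 c cs
      else (PySem.Int.toStr sum ++ "," ++ PySem.Int.toStr prev) :: pvE 1 c cs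

-- push a pending run (p, s) onto a group list, merging with an equal-keyed head
def pvMerge (p s : Int) : List (Int × Int) → List (Int × Int)
  | [] => [(p, s)]
  | (q, n) :: rest => if q = p then (p, s + n) :: rest else (p, s) :: (q, n) :: rest

-- B's per-group emission, as filter + map
def pvEncL (gs : List (Int × Int)) : List String :=
  (gs.filter (fun g => g.1 ≠ 0)).map (fun g => PySem.Int.toStr g.2 ++ "," ++ PySem.Int.toStr g.1)

theorem pv_join_pair (a b : String) : PySem.Str.join "," [a, b] = a ++ "," ++ b := by
  apply String.ext
  simp [PySem.Str.toList_join, PySem.Chars.join, List.intercalate]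

theorem pv_groups_cons (c : Int) (cs : List Int) :
    pvGroups (c :: cs) = pvMerge c 1 (pvGroups cs) := by
  cases cs with
  | nil => simp [pvGroups, pvMerge]
  | cons d ds =>
    by_cases h : d = c
    · subst h
      simp only [pvGroups, List.takeWhile_cons, List.dropWhile_cons, pvMerge,
        beq_self_eq_true, if_true, List.length_cons]
      simp only [List.cons.injEq, Prod.mk.injEq, true_and, and_true]
      push_cast
      ring
    · have hb : (d == c) = false := by simp [h]
      simp only [pvGroups, List.takeWhile_cons, List.dropWhile_cons, hb, pvMerge,
        Bool.false_eq_true, if_false]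
      simp [h]

theorem pv_merge_merge_same (p s t : Int) (g : List (Int × Int)) :
    pvMerge p s (pvMerge p t g) = pvMerge p (s + t) g := by
  cases g with
  | nil => simp [pvMerge]
  | cons h rest =>
    obtain ⟨q, n⟩ := h
    by_cases hq : q = p <;> simp [pvMerge, hq, add_assoc]

theorem pv_merge_merge_ne (p s q t : Int) (g : List (Int × Int)) (h : q ≠ p) :
    pvMerge p s (pvMerge q t g) = (p, s) :: pvMerge q t g := by
  cases g with
  | nil => simp [pvMerge, h]
  | cons h' rest =>
    obtain ⟨r, n⟩ := h'
    by_cases hr : r = q <;> simp [pvMerge, hr, h]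

theorem pv_encL_merge_zero (s : Int) (g : List (Int × Int)) :
    pvEncL (pvMerge 0 s g) = pvEncL g := by
  cases g with
  | nil => simp [pvMerge, pvEncL]
  | cons h rest =>
    obtain ⟨q, n⟩ := h
    by_cases hq : q = 0 <;> simp [pvMerge, pvEncL, hq]

theorem pv_encL_cons_ne (p s : Int) (g : List (Int × Int)) (h : p ≠ 0) :
    pvEncL ((p, s) :: g) =
      (PySem.Int.toStr s ++ "," ++ PySem.Int.toStr p) :: pvEncL g := by
  simp [pvEncL, h]

-- A's fold + finalization, mapped to joined strings, equals pvE of the starting state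
theorem pv_foldl_eq_E (row : List Int) : ∀ (sum prev : Int) (res : List (String × String)),
    (let st := row.foldl pvAStep (sum, res, prev)
     (if st.1 ≠ 0 then st.2.1 ++ [(PySem.Int.toStr st.1, PySem.Int.toStr st.2.2)] else st.2.1).map
       (fun component => PySem.Str.join "," [component.1, component.2]))
    = res.map (fun component => PySem.Str.join "," [component.1, component.2])
      ++ pvE sum prev row := by
  intro sum prev res
  induction row generalizing sum prev res with
  | nil =>
    by_cases hs : sum = 0 <;> simp [pvE, hs, pv_join_pair]
  | cons c cs ih =>
    simp only [List.foldl_cons, pvAStep]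
    by_cases h1 : c = 0
    · by_cases h2 : prev = 0
      · simp only [h1, h2, ne_eq, not_true_eq_false, if_false]
        rw [ih]
        simp [pvE]
      · simp only [h1, ne_eq, h2, not_false_eq_true, if_true]
        rw [ih]
        simp [pvE, h2, pv_join_pair]
    · by_cases h2 : c = prev
      · subst h2
        simp only [if_neg h1, if_true]
        rw [ih]
        simp [pvE, h1]
      · by_cases h3 : prev = 0
        · simp only [h3, if_neg h1]
          rw [ih]
          simp [pvE, h1]
        · simp only [if_neg h1, if_neg h2, if_neg h3]
          rw [ih]
          simp [pvE, h1, h2, h3, pv_join_pair]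

-- the state-machine output equals the grouped output
theorem pv_E_eq_encL (row : List Int) :
    pvE 0 0 row = pvEncL (pvGroups row) ∧
    ∀ sum prev : Int, prev ≠ 0 → 1 ≤ sum →
      pvE sum prev row = pvEncL (pvMerge prev sum (pvGroups row)) := by
  induction row with
  | nil =>
    refine ⟨by simp [pvE, pvGroups, pvEncL], ?_⟩
    intro sum prev hp hs
    have hs' : sum ≠ 0 := by omega
    simp [pvE, pvGroups, pvMerge, pvEncL, hs', hp]
  | cons c cs ih =>
    obtain ⟨ih1, ih2⟩ := ih
    constructor
    · by_cases h1 : c = 0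
      · subst h1
        have hstep : pvE 0 0 ((0 : Int) :: cs) = pvE 0 0 cs := by simp [pvE]
        rw [hstep, ih1, pv_groups_cons, pv_encL_merge_zero]
      · have hstep : pvE 0 0 (c :: cs) = pvE 1 c cs := by simp [pvE, h1]
        rw [hstep, ih2 1 c h1 le_rfl, pv_groups_cons]
    · intro sum prev hp hs
      by_cases h1 : c = 0
      · subst h1
        have hstep : pvE sum prev ((0 : Int) :: cs) =
            (PySem.Int.toStr sum ++ "," ++ PySem.Int.toStr prev) :: pvE 0 0 cs := by
          simp [pvE, hp]
        rw [hstep, ih1, pv_groups_cons, pv_merge_merge_ne prev sum 0 1 _ (Ne.symm hp),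
          pv_encL_cons_ne prev sum _ hp, pv_encL_merge_zero]
      · by_cases h2 : c = prev
        · subst h2
          have hstep : pvE sum c (c :: cs) = pvE (sum + 1) c cs := by simp [pvE, h1]
          rw [hstep, ih2 (sum + 1) c h1 (by omega), pv_groups_cons,
            pv_merge_merge_same c sum 1]
        · have hstep : pvE sum prev (c :: cs) =
              (PySem.Int.toStr sum ++ "," ++ PySem.Int.toStr prev) :: pvE 1 c cs := by
            simp [pvE, h1, h2, hp]
          rw [hstep, ih2 1 c h1 le_rfl, pv_groups_cons,
            pv_merge_merge_ne prev sum c 1 _ h2,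
            pv_encL_cons_ne prev sum _ hp]

-- ===== VERDICT (by name: the statement is the Claim_ definition above) =====
theorem getRowRules_spec : Claim_equal_getRowRules := by
  intro row _
  unfold Spec_getRowRules getRowRules getRowRules_alt
  have hb :
      List.foldl
        (fun (parts : List String) (g : Int × Int) =>
          if g.1 ≠ 0 then parts ++ [PySem.Int.toStr g.2 ++ "," ++ PySem.Int.toStr g.1] else parts)
        [] (pvGroups row) = pvEncL (pvGroups row) := by
    have h := PySem.List.foldl_append_if (fun g : Int × Int => decide (g.1 ≠ 0))
      (fun g => PySem.Int.toStr g.2 ++ "," ++ PySem.Int.toStr g.1) (pvGroups row) []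
    simpa [pvEncL] using h
  rw [hb]
  have h1 := pv_foldl_eq_E row 0 0 []
  simp only [List.map_nil, List.nil_append] at h1 ⊢
  rw [h1, (pv_E_eq_encL row).1]
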